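-- pv_equiv track=rewrite | github.com/deepchecks/deepchecks | mlchecks/string_utils.py | split_by_order
-- ===== SOURCE A (Python) =====
-- from typing import Dict, Set, List, Union, Tuple
-- from copy import copy
--
-- def split_by_order(s: str, separators: List[str], keep: bool = True) -> List[str]:
--     """
--     Split string by a a list of substrings, each used once as a separator.
--
--     Args:
--         s (str): the string to split
--         separators (List[str]): list of substrings to split by
--         keep (bool): whether to keep the separators in list as well. Default is True.
--
--     Returns:
--         List[str]: list of substrings
--     """
--     split_s = []
--     separators = copy(separators)
--     while len(s) != 0:
--         if len(separators) > 0: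
--             sep = separators[0]
--             if s.find(sep) == 0:
--                 if keep is True:
--                     split_s.append(sep)
--                 s = s[len(sep):]
--                 separators.pop(0)
--             else:
--                 pre, _ = s.split(sep, 1)
--                 split_s.append(pre)
--                 s = s[len(pre):]
--         else:
--             split_s.append(s)
--             break
--     return split_s
-- ===== SOURCE B (Python) =====
-- from typing import List
--
--
-- def split_by_order(s: str, separators: List[str], keep: bool = True) -> List[str]:
--     split_s = []
--     for sep in separators:
--         if not s:
--             break
--         if not s.startswith(sep):
--             pre, _ = s.split(sep, 1)
--             split_s.append(pre)
--             s = s[len(pre):]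
--         if keep:
--             split_s.append(sep)
--         s = s[len(sep):]
--     if s:
--         split_s.append(s)
--     return split_s
-- ===== Notes on version B (the rewrite author's own statement) =====
-- stated objective: simpler
-- what changed: Replaces the while-loop over a mutated copy of the separators (pop(0), two iterations per separator when a prefix precedes it) by a single for-loop over the separators that handles the prefix and the separator in one iteration, with the trailing remainder appended after the loop.
import Mathlib
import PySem

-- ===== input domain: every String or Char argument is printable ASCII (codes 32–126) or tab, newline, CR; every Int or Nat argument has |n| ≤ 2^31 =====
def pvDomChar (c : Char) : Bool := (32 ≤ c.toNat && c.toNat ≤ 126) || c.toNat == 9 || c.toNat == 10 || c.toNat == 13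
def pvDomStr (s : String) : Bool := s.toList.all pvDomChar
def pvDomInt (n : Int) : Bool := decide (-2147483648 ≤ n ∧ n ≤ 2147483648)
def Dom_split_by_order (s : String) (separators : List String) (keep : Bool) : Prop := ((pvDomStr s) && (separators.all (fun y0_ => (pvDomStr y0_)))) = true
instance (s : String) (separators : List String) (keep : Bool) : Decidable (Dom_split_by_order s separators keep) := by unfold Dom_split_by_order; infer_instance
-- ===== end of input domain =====

-- B replaces A's while-loop with pop(0) on a copied separator list (two iterations per
-- separator preceded by text) by one for-loop over the separators handling prefix and
-- separator together; objective: simpler.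


-- ===== PORT A =====
-- A's while-loop: state = (remaining string, remaining separators, output list).
-- 'pre, _ = s.split(sep, 1)' is ported via find/take (split's first piece is s[:s.find(sep)]);
-- when sep is absent Python raises ValueError there: the port returns the accumulator
-- (such inputs are excluded by Pre_split_by_order).
def aLoop (keep : Bool) (s : List Char) (seps : List String) (acc : List String) : List String :=
  if s.length = 0 then acc
  else
    match seps with
    | sep :: rest =>
      if PySem.Chars.find s sep.toList = 0 then
        aLoop keep (s.drop sep.toList.length) rest (if keep then acc ++ [sep] else acc)
      else if PySem.Chars.isIn sep.toList s then
        aLoop keep (s.drop (PySem.Chars.find s sep.toList).toNat) (sep :: rest)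
          (acc ++ [String.ofList (s.take (PySem.Chars.find s sep.toList).toNat)])
      else acc  -- Python: ValueError from 'pre, _ = s.split(sep, 1)'; outside Pre_
    | [] => acc ++ [String.ofList s]
  termination_by (s.length + seps.length, seps.length)
  decreasing_by
  · refine Prod.Lex.left _ _ ?_
    simp [List.length_drop]
    omega
  · refine Prod.Lex.left _ _ ?_
    have hin : PySem.Chars.isIn sep.toList s = true := by assumption
    have hne : PySem.Chars.find s sep.toList ≠ 0 := by assumption
    have hnn : (0:Int) ≤ PySem.Chars.find s sep.toList := by
      rw [PySem.Chars.find_nonneg_iff]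
      exact (PySem.Chars.isIn_iff_infix _ _).1 hin
    have hlen : PySem.Chars.find s sep.toList ≤ (s.length : Int) := PySem.Chars.find_le_length s sep.toList
    have hpos : 0 < (PySem.Chars.find s sep.toList).toNat := by omega
    have hub : (PySem.Chars.find s sep.toList).toNat ≤ s.length := by omega
    simp [List.length_drop]
    omega

def split_by_order (s : String) (separators : List String) (keep : Bool) : List String :=
  aLoop keep s.toList separators []

-- ===== PORT B =====
-- B's for-loop over the separators (break when the string is empty); the remainder is
-- appended after the loop.  Same ValueError point as A when a separator is absent.
def bLoop (keep : Bool) : List String → List Char → List String → List String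
  | [], s, acc => if s.length = 0 then acc else acc ++ [String.ofList s]
  | sep :: rest, s, acc =>
    if s.length = 0 then acc  -- break; the final 'if s:' append does nothing
    else if PySem.Chars.startswith s sep.toList then
      bLoop keep rest (s.drop sep.toList.length) (if keep then acc ++ [sep] else acc)
    else if PySem.Chars.isIn sep.toList s then
      bLoop keep rest
        ((s.drop (s.take (PySem.Chars.find s sep.toList).toNat).length).drop sep.toList.length)
        ((acc ++ [String.ofList (s.take (PySem.Chars.find s sep.toList).toNat)]) ++
          (if keep then [sep] else []))
    else acc  -- Python: ValueError from 'pre, _ = s.split(sep, 1)'; outside Pre_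

def split_by_order_alt (s : String) (separators : List String) (keep : Bool) : List String :=
  bLoop keep separators s.toList []

-- ===== PRECONDITION & SPEC =====
-- Pre_ excludes exactly the inputs on which Python A raises ValueError ('pre, _ =
-- s.split(sep, 1)' with sep absent): each separator must occur in what is left of s
-- when its turn comes (separators after the point where s is exhausted are never
-- looked at; an empty separator is always found at position 0).  This condition is
-- irreducibly sequential — the residue a separator is searched in is s minus the
-- FIRST occurrences of the earlier separators (e.g. s = "aba", separators =
-- ["a", "x"] raises even though "ab"+"a" covers s) — so it is stated as a
-- membership test per separator over the successive residues; it builds no output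
-- and ignores keep.
def sepsFound : List Char → List String → Bool
  | _, [] => true
  | s, sep :: rest =>
    if s.length = 0 then true
    else if PySem.Chars.isIn sep.toList s then
      sepsFound ((s.drop (PySem.Chars.find s sep.toList).toNat).drop sep.toList.length) rest
    else false

def Pre_split_by_order (s : String) (separators : List String) (keep : Bool) : Prop :=
  sepsFound s.toList separators = true
instance (s : String) (separators : List String) (keep : Bool) : Decidable (Pre_split_by_order s separators keep) := by unfold Pre_split_by_order; infer_instance

def pvWitness_split_by_order : String × List String × Bool := ("a,b;c", [",", ";"], true)

def Spec_split_by_order (s : String) (separators : List String) (keep : Bool) (out : List String) : Prop := out = split_by_order_alt s separators keep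
instance (s : String) (separators : List String) (keep : Bool) (out : List String) : Decidable (Spec_split_by_order s separators keep out) := by unfold Spec_split_by_order; infer_instance

-- ===== CLAIM (what is proved, stated in full; the proofs are below) =====
def Claim_equal_split_by_order : Prop := ∀ (s : String) (separators : List String) (keep : Bool), Dom_split_by_order s separators keep → Pre_split_by_order s separators keep → Spec_split_by_order s separators keep (split_by_order s separators keep)

-- ===== LEMMAS AND PROOFS =====

theorem find_eq_zero_iff_prefix (s sub : List Char) :
    PySem.Chars.find s sub = 0 ↔ sub <+: s := by
  constructor
  · intro h
    have hnn : (0:Int) ≤ PySem.Chars.find s sub := by omega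
    have := (PySem.Chars.find_spec (s := s) (sub := sub) hnn).1
    simpa [h] using this
  · intro h
    have hnn : (0:Int) ≤ PySem.Chars.find s sub := by
      rw [PySem.Chars.find_nonneg_iff]
      exact h.isInfix
    rcases PySem.Chars.find_spec (s := s) (sub := sub) hnn with ⟨_, hmin⟩
    by_contra hne
    have hpos : 0 < (PySem.Chars.find s sub).toNat := by omega
    exact hmin 0 hpos (by simpa using h)

theorem loops_eq (keep : Bool) (seps : List String) :
    ∀ (s : List Char) (acc : List String), sepsFound s seps = true →
      aLoop keep s seps acc = bLoop keep seps s acc := by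
  induction seps with
  | nil =>
    intro s acc _
    rw [aLoop, bLoop]
  | cons sep rest ih =>
    intro s acc hpre
    by_cases hs : s.length = 0
    · rw [aLoop, bLoop]; simp [hs]
    · have hpre' := hpre
      rw [sepsFound] at hpre'
      simp only [hs, if_false] at hpre'
      by_cases hin : PySem.Chars.isIn sep.toList s = true
      · simp only [hin, if_true] at hpre'
        have hnn : (0:Int) ≤ PySem.Chars.find s sep.toList := by
          rw [PySem.Chars.find_nonneg_iff]; exact (PySem.Chars.isIn_iff_infix _ _).1 hin
        have hlen : PySem.Chars.find s sep.toList ≤ (s.length : Int) :=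
          PySem.Chars.find_le_length s sep.toList
        by_cases h0 : PySem.Chars.find s sep.toList = 0
        · -- separator is a prefix: one step of each loop
          have hsw : PySem.Chars.startswith s sep.toList = true := by
            rw [PySem.Chars.startswith_iff]
            exact (find_eq_zero_iff_prefix s sep.toList).1 h0
          rw [aLoop, bLoop]
          simp only [hs, if_false, h0, if_true, hsw]
          have harg : (s.drop (PySem.Chars.find s sep.toList).toNat).drop sep.toList.length
              = s.drop sep.toList.length := by simp [h0]
          rw [harg] at hpre'
          exact ih _ _ hpre'
        · -- text before the separator: A takes two steps, B one
          have hsw : PySem.Chars.startswith s sep.toList = false := by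
            by_contra hc
            have : PySem.Chars.startswith s sep.toList = true := by
              cases h : PySem.Chars.startswith s sep.toList
              · exact absurd h hc
              · rfl
            exact h0 ((find_eq_zero_iff_prefix s sep.toList).2
              ((PySem.Chars.startswith_iff s sep.toList).1 this))
          set k := (PySem.Chars.find s sep.toList).toNat with hk
          have hkpos : 0 < k := by omega
          have hkle : k ≤ s.length := by omega
          have hprefix : sep.toList <+: s.drop k := by
            have := (PySem.Chars.find_spec (s := s) (sub := sep.toList) hnn).1
            simp only [hk] at this ⊢
            exact this
          have hsepne : sep.toList ≠ [] := by
            intro hnil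
            exact h0 (by simpa [hnil] using PySem.Chars.find_nil s)
          -- after A's first step the separator is a prefix of the remainder
          have hd_ne : (s.drop k).length ≠ 0 := by
            have hlen2 := hprefix.length_le
            have hsl : sep.toList.length ≠ 0 :=
              fun h => hsepne (List.eq_nil_of_length_eq_zero h)
            simp only [List.length_drop] at hlen2 ⊢
            omega
          have hfind2 : PySem.Chars.find (s.drop k) sep.toList = 0 :=
            (find_eq_zero_iff_prefix _ _).2 hprefix
          have htake : (s.take k).length = k := by simp [List.length_take]; omega
          -- unfold A twice
          rw [aLoop]
          simp only [hs, if_false, h0, hin, if_true, ← hk]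
          rw [aLoop]
          simp only [hd_ne, hfind2, if_true]
          -- unfold B once
          rw [bLoop]
          simp only [hs, hsw, hin, if_true, Bool.false_eq_true, if_false, ← hk,
            htake]
          have haccs : (if keep then (acc ++ [String.ofList (s.take k)]) ++ [sep]
                else acc ++ [String.ofList (s.take k)])
              = (acc ++ [String.ofList (s.take k)]) ++ (if keep then [sep] else []) := by
            by_cases hkeep : keep = true <;> simp [hkeep]
          rw [haccs]
          exact ih _ _ (by simpa [hk, htake] using hpre')
      · -- separator absent and string nonempty: excluded by Pre_
        simp [hin] at hpre'

-- ===== VERDICT (by name: the statement is the Claim_ definition above) =====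
theorem split_by_order_spec : Claim_equal_split_by_order := by
  intro s separators keep _ hpre
  unfold Spec_split_by_order split_by_order split_by_order_alt
  exact loops_eq keep separators s.toList [] hpre
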